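-- pv_equiv track=rewrite | github.com/FireLabSoftware/VariantRabbit | VariantRabbit_ba03_080524.py | FindMe1
-- ===== SOURCE A (Python) =====
-- def antisense(s):
--     return s.replace('A','t').replace('T','a').replace('G','c').replace('C','g').upper()[::-1]
--
-- def FindMe1(s,t,Circular=False):
--     ''' a circle-capable finder for a target t in a sequence s.  Returns a list of positions (zero based) as tuples [position, orientation [0=sense, 1=anti]'''
--     PosList = []
--     if Circular:
--         s += s[:len(t)-1]
--     p = s.find(t)
--     while p>=0:
--         PosList.append((p,1))
--         p = s.find(t,p+1)
--     ant = antisense(t)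
--     p = s.find(ant)
--     while p>=0:
--         PosList.append((p,-1))
--         p = s.find(ant,p+1)
--     return PosList
-- ===== SOURCE B (Python) =====
-- def antisense(s):
--     return s.replace('A','t').replace('T','a').replace('G','c').replace('C','g').upper()[::-1]
--
-- def FindMe1(s, t, Circular=False):
--     '''One scan over all candidate start positions, testing each slice against
--     the target and its antisense directly, instead of repeated str.find calls.'''
--     if Circular:
--         s = s + s[:len(t)-1]
--     ant = antisense(t)
--     n = len(s)
--     m = len(t)
--     sense = [(i, 1) for i in range(n - m + 1) if s[i:i+m] == t]
--     anti = [(i, -1) for i in range(n - m + 1) if s[i:i+m] == ant]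
--     return sense + anti
-- ===== Notes on version B (the rewrite author's own statement) =====
-- stated objective: alternative
-- what changed: Replaced the two repeated str.find while-loops that chase the next occurrence pointer with a single comprehension over all candidate start positions testing each fixed-length slice against the target and its antisense.
import Mathlib
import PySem

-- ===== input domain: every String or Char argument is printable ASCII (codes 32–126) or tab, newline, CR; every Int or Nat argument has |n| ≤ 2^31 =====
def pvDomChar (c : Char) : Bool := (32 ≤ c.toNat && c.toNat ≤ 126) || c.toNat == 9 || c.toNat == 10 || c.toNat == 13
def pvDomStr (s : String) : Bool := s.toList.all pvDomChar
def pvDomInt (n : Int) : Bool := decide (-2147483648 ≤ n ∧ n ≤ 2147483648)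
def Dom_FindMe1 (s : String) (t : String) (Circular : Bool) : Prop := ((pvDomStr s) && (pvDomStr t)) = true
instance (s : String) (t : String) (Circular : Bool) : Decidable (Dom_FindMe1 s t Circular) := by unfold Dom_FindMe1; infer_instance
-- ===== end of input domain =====

-- B replaces A's repeated str.find while-loops by one scan over all candidate start
-- positions testing each slice against target / antisense (objective: alternative).
-- ===== PORT A =====
-- antisense(t): chain of replaces, upper, then [::-1]
def pvAntisense (t : List Char) : List Char :=
  ((PySem.Chars.slice? (PySem.Chars.upper
      (PySem.Chars.replace (PySem.Chars.replace (PySem.Chars.replace (PySem.Chars.replace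
        t "A".toList "t".toList) "T".toList "a".toList) "G".toList "c".toList) "C".toList "g".toList))
      none none (-1)).getD [])

-- the 'while p >= 0: append; p = s.find(t, p+1)' loop; fuel bounds the iterations
def pvLoopA (s pat : List Char) (tag : Int) : Nat → Int → List (Int × Int)
  | 0, _ => []
  | fuel + 1, p =>
      if p ≥ 0 then
        (p, tag) :: pvLoopA s pat tag fuel (PySem.Chars.findFrom s pat (p + 1) none)
      else []

def FindMe1 (s : String) (t : String) (Circular : Bool) : List (Int × Int) :=
  let sl := s.toList
  let tl := t.toList
  let s1 := if Circular then sl ++ PySem.List.slice sl none (some ((tl.length : Int) - 1)) else sl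
  let senseList := pvLoopA s1 tl 1 (s1.length + 1) (PySem.Chars.find s1 tl)
  let ant := pvAntisense tl
  let antiList := pvLoopA s1 ant (-1) (s1.length + 1) (PySem.Chars.find s1 ant)
  senseList ++ antiList

-- ===== PORT B =====
-- [(i, tag) for i in range(n-m+1) if s[i:i+m] == pat]
def pvScanB (s pat : List Char) (tag : Int) : List (Int × Int) :=
  ((PySem.List.pyRange 0 ((s.length : Int) - (pat.length : Int) + 1) 1).filter
      (fun i => PySem.List.slice s (some i) (some (i + (pat.length : Int))) == pat)).map
    (fun i => (i, tag))

def FindMe1_alt (s : String) (t : String) (Circular : Bool) : List (Int × Int) :=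
  let sl := s.toList
  let tl := t.toList
  let s1 := if Circular then sl ++ PySem.List.slice sl none (some ((tl.length : Int) - 1)) else sl
  let ant := pvAntisense tl
  pvScanB s1 tl 1 ++ pvScanB s1 ant (-1)

-- ===== PRECONDITION & SPEC =====
def Spec_FindMe1 (s : String) (t : String) (Circular : Bool) (out : List (Int × Int)) : Prop := out = FindMe1_alt s t Circular
instance (s : String) (t : String) (Circular : Bool) (out : List (Int × Int)) : Decidable (Spec_FindMe1 s t Circular out) := by unfold Spec_FindMe1; infer_instance

-- ===== CLAIM (what is proved, stated in full; the proofs are below) =====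
def Claim_equal_FindMe1 : Prop := ∀ (s : String) (t : String) (Circular : Bool), Dom_FindMe1 s t Circular → Spec_FindMe1 s t Circular (FindMe1 s t Circular)

-- ===== LEMMAS AND PROOFS =====


-- positions where pat occurs in s, in increasing order
def pvMatches (s pat : List Char) : List Nat :=
  (List.range (s.length + 1 - pat.length)).filter (fun i => decide (pat <+: s.drop i))

theorem pv_findFrom_past (s pat : List Char) (k : Nat) (h : s.length < k) :
    PySem.Chars.findFrom s pat (k : Int) none = -1 := by
  simp [PySem.Chars.findFrom]
  omega

theorem pv_mem_matches_lt (s pat : List Char) (i : Nat) (hi : i ∈ pvMatches s pat) :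
    i ≤ s.length := by
  unfold pvMatches at hi
  have := List.mem_range.mp (List.mem_of_mem_filter hi)
  omega

theorem pv_matches_prefix (s pat : List Char) (i : Nat) (hi : i ∈ pvMatches s pat) :
    pat <+: s.drop i := by
  unfold pvMatches at hi
  have := List.of_mem_filter hi
  simpa using this

theorem pv_mem_matches (s pat : List Char) (i : Nat) (h : pat <+: s.drop i) (hil : i ≤ s.length) :
    i ∈ pvMatches s pat := by
  unfold pvMatches
  refine List.mem_filter.mpr ⟨List.mem_range.mpr ?_, by simpa using h⟩
  have hlen := h.length_le
  simp [List.length_drop] at hlen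
  omega

-- scan step: pull the first admissible match out of the filtered match list
theorem pv_filter_step (N : Nat) (P : Nat → Bool) (k q : Nat) (hq : q < N) (hP : P q = true)
    (hk : k ≤ q) (hmin : ∀ i, k ≤ i → i < q → P i = false) :
    ((List.range N).filter P).filter (fun i => decide (k ≤ i)) =
      q :: ((List.range N).filter P).filter (fun i => decide (q + 1 ≤ i)) := by
  rw [List.filter_filter, List.filter_filter]
  have hN : N = (q + 1) + (N - (q + 1)) := by omega
  rw [hN, List.range_add, List.range_succ, List.filter_append, List.filter_append,
      List.filter_append, List.filter_append]
  have h1 : (List.range q).filter (fun a => decide (k ≤ a) && P a) = [] := by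
    refine List.filter_eq_nil_iff.mpr ?_
    intro a ha
    have haq := List.mem_range.mp ha
    by_cases hka : k ≤ a
    · simp [hmin a hka haq]
    · simp [hka]
  have h2 : (List.range q).filter (fun a => decide (q + 1 ≤ a) && P a) = [] := by
    refine List.filter_eq_nil_iff.mpr ?_
    intro a ha
    have haq := List.mem_range.mp ha
    simp [show ¬ (q + 1 ≤ a) by omega]
  have h3 : ([q] : List Nat).filter (fun a => decide (k ≤ a) && P a) = [q] := by
    simp [hk, hP]
  have h4 : ([q] : List Nat).filter (fun a => decide (q + 1 ≤ a) && P a) = [] := by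
    simp
  have h5 : (List.map (fun x => q + 1 + x) (List.range (N - (q + 1)))).filter
        (fun a => decide (k ≤ a) && P a) =
      (List.map (fun x => q + 1 + x) (List.range (N - (q + 1)))).filter
        (fun a => decide (q + 1 ≤ a) && P a) := by
    rw [List.filter_map, List.filter_map]
    congr 1
    apply List.filter_congr
    intro x _
    simp only [Function.comp]
    have ha : k ≤ q + 1 + x := by omega
    have hb : q + 1 ≤ q + 1 + x := by omega
    simp [ha, hb]
  rw [h1, h2, h3, h4, h5]
  simp only [List.nil_append, List.singleton_append]

-- all matches are below s.length + 1
theorem pv_filter_big (s pat : List Char) (k : Nat) (hk : s.length < k) (f : Nat → Int × Int) :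
    ((pvMatches s pat).filter (fun i => decide (k ≤ i))).map f = [] := by
  have : (pvMatches s pat).filter (fun i => decide (k ≤ i)) = [] := by
    refine List.filter_eq_nil_iff.mpr ?_
    intro i hi
    have := pv_mem_matches_lt s pat i hi
    simp
    omega
  simp [this]

theorem pv_loopA_eq (s pat : List Char) (tag : Int) :
    ∀ (fuel k : Nat), k ≤ s.length + 1 → s.length + 1 - k ≤ fuel →
    pvLoopA s pat tag fuel (PySem.Chars.findFrom s pat (k : Int) none) =
      ((pvMatches s pat).filter (fun i => decide (k ≤ i))).map (fun i : Nat => ((i : Int), tag)) := by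
  intro fuel
  induction fuel with
  | zero =>
    intro k hk hf
    have hk' : k = s.length + 1 := by omega
    rw [pvLoopA]
    rw [pv_filter_big s pat k (by omega)]
  | succ fuel ih =>
    intro k hk hf
    by_cases hbig : s.length < k
    · rw [pv_findFrom_past s pat k hbig]
      rw [pvLoopA]
      simp only [show ¬ ((-1 : Int) ≥ 0) by omega, ite_false]
      rw [pv_filter_big s pat k hbig]
    · replace hbig : k ≤ s.length := by omega
      by_cases hq : PySem.Chars.findFrom s pat (k : Int) none = -1
      · have hno := (PySem.Chars.findFrom_natCast_eq_neg_one_iff s pat k hbig).mp hq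
        rw [hq, pvLoopA]
        simp only [show ¬ ((-1 : Int) ≥ 0) by omega, ite_false]
        have hnil : (pvMatches s pat).filter (fun i => decide (k ≤ i)) = [] := by
          refine List.filter_eq_nil_iff.mpr ?_
          intro i hi
          simp only [decide_eq_true_eq]
          intro hki
          apply hno
          have hpre := pv_matches_prefix s pat i hi
          have : s.drop i = (s.drop k).drop (i - k) := by
            rw [List.drop_drop]
            congr 1
            omega
          rw [this] at hpre
          exact hpre.isInfix.trans (List.drop_suffix _ _).isInfix
        rw [hnil]
        rfl
      · obtain ⟨hkq, hpre, hmin⟩ := PySem.Chars.findFrom_natCast_spec s pat k hbig hq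
        set q := PySem.Chars.findFrom s pat (k : Int) none with hqdef
        have hq0 : 0 ≤ q := le_trans (by exact_mod_cast Nat.zero_le k) hkq
        have hqlen : q ≤ s.length := by
          rw [hqdef, PySem.Chars.findFrom_natCast s pat k hbig]
          split
          · omega
          · have h1 := PySem.Chars.find_le_length (s.drop k) pat
            simp [List.length_drop] at h1
            omega
        have hqn : q = ((q.toNat : Nat) : Int) := by omega
        rw [pvLoopA]
        simp only [show q ≥ 0 by omega, if_pos]
        have hstep : q + 1 = ((q.toNat + 1 : Nat) : Int) := by omega
        rw [hstep, ih (q.toNat + 1) (by omega) (by omega)]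
        have hkq' : k ≤ q.toNat := by omega
        have hqmem : q.toNat ∈ pvMatches s pat := pv_mem_matches s pat q.toNat hpre (by omega)
        have hrange : q.toNat < s.length + 1 - pat.length := by
          unfold pvMatches at hqmem
          exact List.mem_range.mp (List.mem_of_mem_filter hqmem)
        have := pv_filter_step (s.length + 1 - pat.length)
          (fun i => decide (pat <+: s.drop i)) k q.toNat hrange (by simpa using hpre) hkq'
          (fun i h1 h2 => by simpa using hmin i h1 h2)
        unfold pvMatches
        rw [this]
        simp only [List.map_cons]
        rw [← hqn]

theorem pv_scanB_eq (s pat : List Char) (tag : Int) :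
    pvScanB s pat tag = (pvMatches s pat).map (fun i : Nat => ((i : Int), tag)) := by
  unfold pvScanB pvMatches
  rw [PySem.List.pyRange_one]
  rw [List.filter_map]
  have hN : ((s.length : Int) - (pat.length : Int) + 1 - 0).toNat = s.length + 1 - pat.length := by
    omega
  rw [hN, List.map_map]
  have hfil : (List.range (s.length + 1 - pat.length)).filter
        ((fun i => PySem.List.slice s (some i) (some (i + (pat.length : Int))) == pat) ∘
          (fun k : Nat => (0 : Int) + (k : Int))) =
      (List.range (s.length + 1 - pat.length)).filter (fun i => decide (pat <+: s.drop i)) := by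
    apply List.filter_congr
    intro k _
    simp only [Function.comp]
    have h0 : (0 : Int) + (k : Int) = ((k : Nat) : Int) := by norm_num
    rw [h0, PySem.List.slice_natCast_add]
    have hbe : (List.take pat.length (List.drop k s) == pat) =
        decide (List.take pat.length (List.drop k s) = pat) := by
      by_cases h : List.take pat.length (List.drop k s) = pat <;> simp [h]
    rw [hbe, decide_eq_decide]
    constructor
    · intro h; rw [List.prefix_iff_eq_take]; exact h.symm
    · intro h; exact (List.prefix_iff_eq_take.mp h).symm
  rw [hfil]
  apply List.map_congr_left
  intro k _
  simp


theorem key_lemma : ∀ (s pat : List Char) (tag : Int),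
    pvLoopA s pat tag (s.length + 1) (PySem.Chars.find s pat) = pvScanB s pat tag := by
  intro s pat tag
  have h0 : PySem.Chars.find s pat = PySem.Chars.findFrom s pat ((0 : Nat) : Int) none := by
    simp
  rw [h0, pv_loopA_eq s pat tag (s.length + 1) 0 (by omega) (by omega), pv_scanB_eq]
  congr 1
  simp

-- ===== VERDICT (by name: the statement is the Claim_ definition above) =====
theorem FindMe1_spec : Claim_equal_FindMe1 := by
  intro s t Circular _
  unfold Spec_FindMe1 FindMe1 FindMe1_alt
  simp only []
  rw [key_lemma, key_lemma]
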